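-- pv_equiv track=rewrite | github.com/spaghettiboi54/Solutions | 03_fun/S1610_pyramid_exercise.py | create_pyramid
-- ===== SOURCE A (Python) =====
-- def create_pyramid(lines):
--     pyramid = []
--     initial_numbers = [1,1]
--     pyramid.append(initial_numbers)
--     for new_line_index in range(1, lines): #index of
--         pyramid.append([])
--         for index in range(len(pyramid[-2]) - 1): #iterating over the index of each item in previous line
--             pyramid[new_line_index].append(pyramid[new_line_index - 1][index])
--             if pyramid[new_line_index - 1][index] + pyramid[new_line_index - 1][index + 1] == new_line_index + 1:
--                 pyramid[new_line_index].append(new_line_index + 1)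
--         pyramid[new_line_index].append(pyramid[new_line_index - 1][-1])
--     return pyramid
-- ===== SOURCE B (Python) =====
-- def create_pyramid(lines):
--     # Row at index i lists the denominators of the Farey sequence of order i+1.
--     # Each row is generated directly (independently of the previous row) with the
--     # standard Farey next-term recurrence, instead of inserting into the prior row.
--     pyramid = [[1, 1]]
--     for order in range(2, lines + 1):
--         row = [1]
--         a, b, c, d = 0, 1, 1, order
--         while c <= order:
--             k = (order + b) // d
--             a, b, c, d = c, d, k * c - a, k * d - b
--             row.append(b)
--         pyramid.append(row)
--     return pyramid
-- ===== Notes on version B (the rewrite author's own statement) =====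
-- stated objective: alternative
-- what changed: Row i is recognised as the denominators of the Farey sequence of order i+1, and each row is generated from scratch by the Farey next-term recurrence (state (a,b,c,d), k=(order+b)//d) instead of A's construction that builds every row by inserting the new value between adjacent entries of the previous row.
import Mathlib
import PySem

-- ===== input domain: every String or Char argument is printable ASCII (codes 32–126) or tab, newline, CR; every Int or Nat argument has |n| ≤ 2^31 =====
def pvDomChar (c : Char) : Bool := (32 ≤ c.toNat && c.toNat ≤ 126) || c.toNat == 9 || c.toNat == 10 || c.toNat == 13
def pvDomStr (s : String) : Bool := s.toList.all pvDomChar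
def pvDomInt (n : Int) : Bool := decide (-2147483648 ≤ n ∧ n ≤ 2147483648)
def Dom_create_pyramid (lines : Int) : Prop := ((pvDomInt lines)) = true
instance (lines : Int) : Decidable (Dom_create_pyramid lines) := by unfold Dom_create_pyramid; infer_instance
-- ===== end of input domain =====

-- B recognises row i as the denominators of the Farey sequence of order i+1 and generates each
-- row from scratch with the Farey next-term recurrence, instead of A's row-by-row insertion
-- into the previous row.

-- ===== PORT A =====
-- pyramid[i].append(v): look the row up by Python index, append (the index is always in range in A).
def pvRowAppend (p : List (List Int)) (i : Int) (v : Int) : List (List Int) :=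
  match PySem.List.pyIdx? p.length i with
  | some j => p.set j ((p.getD j []) ++ [v])
  | none => p

def create_pyramid (lines : Int) : List (List Int) :=
  let pyramid : List (List Int) := []
  let initial_numbers : List Int := [1, 1]
  let pyramid := pyramid ++ [initial_numbers]
  (PySem.List.pyRange 1 lines 1).foldl (fun pyramid n =>
    let pyramid := pyramid ++ [[]]
    -- len(pyramid[-2]) - 1  (pyramid[-2] is always present; .getD [] is never the default branch)
    let prevLen : Int := ((PySem.List.pyGet? pyramid (-2)).getD []).length
    let pyramid := (PySem.List.pyRange 0 (prevLen - 1) 1).foldl (fun pyramid i =>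
      -- pyramid[new_line_index - 1][index] / [index + 1]  (always in range in A)
      let a := (PySem.List.pyGet? ((PySem.List.pyGet? pyramid (n - 1)).getD []) i).getD 0
      let b := (PySem.List.pyGet? ((PySem.List.pyGet? pyramid (n - 1)).getD []) (i + 1)).getD 0
      let pyramid := pvRowAppend pyramid n a
      if a + b = n + 1 then pvRowAppend pyramid n (n + 1) else pyramid) pyramid
    pvRowAppend pyramid n
      ((PySem.List.pyGet? ((PySem.List.pyGet? pyramid (n - 1)).getD []) (-1)).getD 0)) pyramid

-- ===== PORT B =====
-- the 'while c <= order' loop of Source B, with a fuel bound proved sufficient below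
def fareyLoop (n : Int) : Nat → Int → Int → Int → Int → List Int → List Int
  | 0, _, _, _, _, out => out
  | fuel + 1, a, b, c, d, out =>
    if c ≤ n then
      let k := PySem.Int.floordiv (n + b) d
      fareyLoop n fuel c d (k * c - a) (k * d - b) (out ++ [d])
    else out

def fareyRow (order : Int) : List Int :=
  fareyLoop order ((order.toNat + 1) * (order.toNat + 1) + 2) 0 1 1 order [1]

def create_pyramid_alt (lines : Int) : List (List Int) :=
  (PySem.List.pyRange 2 (lines + 1) 1).foldl
    (fun pyramid order => pyramid ++ [fareyRow order]) [[1, 1]]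

-- ===== PRECONDITION & SPEC =====
def Spec_create_pyramid (lines : Int) (out : List (List Int)) : Prop := out = create_pyramid_alt lines
instance (lines : Int) (out : List (List Int)) : Decidable (Spec_create_pyramid lines out) := by unfold Spec_create_pyramid; infer_instance

-- ===== CLAIM (what is proved, stated in full; the proofs are below) =====
def Claim_equal_create_pyramid : Prop := ∀ (lines : Int), Dom_create_pyramid lines → Spec_create_pyramid lines (create_pyramid lines)

-- ===== LEMMAS AND PROOFS =====

-- ---------- the common mathematical spine: the rows built by insertion ----------
def pvBetween (t p : Int) : List Int → List Int
  | [] => []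
  | x :: r => (if p + x = t then [t] else []) ++ x :: pvBetween t x r

def pvNext (t : Int) : List Int → List Int
  | [] => []
  | x :: r => x :: pvBetween t x r

-- what A's inner loop appends for one index i of the previous row
def pvPairAt (t : Int) (xs : List Int) (i : Int) : List Int :=
  ((PySem.List.pyGet? xs i).getD 0) ::
    (if ((PySem.List.pyGet? xs i).getD 0) + ((PySem.List.pyGet? xs (i + 1)).getD 0) = t then [t] else [])

def pvRow : Nat → List Int
  | 0 => [1, 1]
  | k + 1 => pvNext ((k : Int) + 2) (pvRow k)

def pvPyr (k : Nat) : List (List Int) := (List.range (k + 1)).map pvRow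

lemma pvRow_ne_nil (k : Nat) : pvRow k ≠ [] := by
  induction k with
  | zero => simp [pvRow]
  | succ k ih =>
    cases h : pvRow k with
    | nil => exact absurd h ih
    | cons x r => simp [pvRow, h, pvNext]

lemma pvPyr_length (k : Nat) : (pvPyr k).length = k + 1 := by simp [pvPyr]

lemma pvPyr_get (k : Nat) : (pvPyr k)[k]? = some (pvRow k) := by simp [pvPyr]

lemma pvPyr_succ (k : Nat) : pvPyr (k + 1) = pvPyr k ++ [pvRow (k + 1)] := by
  simp [pvPyr, List.range_succ]

-- ---------- A's loop equals the insertion spine ----------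
lemma pvRowAppend_snoc (P : List (List Int)) (c : List Int) (v : Int) :
    pvRowAppend (P ++ [c]) (P.length : Int) v = P ++ [c ++ [v]] := by
  unfold pvRowAppend PySem.List.pyIdx?
  simp [List.getD_eq_getElem?_getD]

lemma pvReadPrev (k : Nat) (cur : List Int) :
    (PySem.List.pyGet? (pvPyr k ++ [cur]) ((k : Int) + 1 - 1)).getD [] = pvRow k := by
  rw [show ((k : Int) + 1 - 1) = ((k : Nat) : Int) by ring, PySem.List.pyGet?_natCast,
      List.getElem?_append_left (by simp [pvPyr_length]), pvPyr_get]
  rfl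

lemma pvRowAppend_pyr (k : Nat) (cur : List Int) (v : Int) :
    pvRowAppend (pvPyr k ++ [cur]) ((k : Int) + 1) v = pvPyr k ++ [cur ++ [v]] := by
  rw [show ((k : Int) + 1) = ((pvPyr k).length : Int) by simp [pvPyr_length], pvRowAppend_snoc]

lemma pvFlatPairs (t : Int) : ∀ (xs : List Int), xs ≠ [] →
    ((PySem.List.pyRange 0 ((xs.length : Int) - 1) 1).flatMap (pvPairAt t xs))
      ++ [((PySem.List.pyGet? xs (-1)).getD 0)]
    = pvNext t xs := by
  intro xs
  induction xs with
  | nil => intro h; exact absurd rfl h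
  | cons x xs ih =>
    intro _
    cases xs with
    | nil =>
      rw [show ((([x] : List Int).length : Int) - 1) = 0 by simp]
      rw [PySem.List.pyRange_one_eq_nil le_rfl]
      simp [PySem.List.pyGet?_neg_one, pvNext, pvBetween]
    | cons y r =>
      have hlen : (((x :: y :: r).length : Int) - 1) = ((y :: r).length : Int) := by
        simp
      rw [hlen, PySem.List.pyRange_zero_nat,
          show (y :: r).length = r.length + 1 from rfl, List.range_succ_eq_map]
      simp only [List.map_cons, List.map_map, List.flatMap_cons, List.flatMap_map,
        Function.comp]
      have h0 : pvPairAt t (x :: y :: r) ((0 : Nat) : Int)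
          = x :: (if x + y = t then [t] else []) := by
        simp only [pvPairAt, PySem.List.pyGet?_natCast]
        rw [show ((0:Nat):Int) + 1 = ((1:Nat):Int) by norm_num, PySem.List.pyGet?_natCast]
        simp
      have hshift : ∀ k : Nat, pvPairAt t (x :: y :: r) ((k + 1 : Nat) : Int)
          = pvPairAt t (y :: r) ((k : Nat) : Int) := by
        intro k
        simp only [pvPairAt]
        rw [show ((k + 1 : Nat) : Int) = ((k : Nat) : Int) + 1 by push_cast; ring,
            PySem.List.pyGet?_cons_succ,
            show (((k : Nat) : Int) + 1) + 1 = ((k + 1 : Nat) : Int) + 1 by push_cast; ring,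
            PySem.List.pyGet?_cons_succ,
            show ((k + 1 : Nat) : Int) = ((k : Nat) : Int) + 1 by push_cast; ring]
      rw [h0]
      simp only [hshift]
      have hih := ih (by simp)
      rw [show (((y :: r).length : Int) - 1) = ((r.length : Nat) : Int) by simp,
          PySem.List.pyRange_zero_nat, List.flatMap_map] at hih
      rw [show PySem.List.pyGet? (x :: y :: r) (-1) = PySem.List.pyGet? (y :: r) (-1) by
            rw [PySem.List.pyGet?_neg_one, PySem.List.pyGet?_neg_one, List.getLast?_cons_cons]]
      simp only [List.cons_append, List.append_assoc, hih, pvNext, pvBetween]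

lemma pvInnerA (k : Nat) (is : List Int) : ∀ (cur : List Int),
    is.foldl (fun pyramid i =>
      if (PySem.List.pyGet? ((PySem.List.pyGet? pyramid ((k : Int) + 1 - 1)).getD []) i).getD 0 +
           (PySem.List.pyGet? ((PySem.List.pyGet? pyramid ((k : Int) + 1 - 1)).getD []) (i + 1)).getD 0 =
           (k : Int) + 1 + 1 then
        pvRowAppend
          (pvRowAppend pyramid ((k : Int) + 1)
            ((PySem.List.pyGet? ((PySem.List.pyGet? pyramid ((k : Int) + 1 - 1)).getD []) i).getD 0))
          ((k : Int) + 1) ((k : Int) + 1 + 1)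
      else
        pvRowAppend pyramid ((k : Int) + 1)
          ((PySem.List.pyGet? ((PySem.List.pyGet? pyramid ((k : Int) + 1 - 1)).getD []) i).getD 0))
      (pvPyr k ++ [cur])
    = pvPyr k ++ [cur ++ is.flatMap (pvPairAt ((k : Int) + 2) (pvRow k))] := by
  induction is with
  | nil => intro cur; simp
  | cons i is ih =>
    intro cur
    simp only [List.foldl_cons, List.flatMap_cons]
    have hstep : (if (PySem.List.pyGet? ((PySem.List.pyGet? (pvPyr k ++ [cur]) ((k : Int) + 1 - 1)).getD []) i).getD 0 +
              (PySem.List.pyGet? ((PySem.List.pyGet? (pvPyr k ++ [cur]) ((k : Int) + 1 - 1)).getD []) (i + 1)).getD 0 =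
            (k : Int) + 1 + 1 then
          pvRowAppend
            (pvRowAppend (pvPyr k ++ [cur]) ((k : Int) + 1)
              ((PySem.List.pyGet? ((PySem.List.pyGet? (pvPyr k ++ [cur]) ((k : Int) + 1 - 1)).getD []) i).getD 0))
            ((k : Int) + 1) ((k : Int) + 1 + 1)
        else
          pvRowAppend (pvPyr k ++ [cur]) ((k : Int) + 1)
            ((PySem.List.pyGet? ((PySem.List.pyGet? (pvPyr k ++ [cur]) ((k : Int) + 1 - 1)).getD []) i).getD 0))
        = pvPyr k ++ [cur ++ pvPairAt ((k : Int) + 2) (pvRow k) i] := by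
      simp only [show (k : Int) + 1 + 1 = (k : Int) + 2 from by ring,
        pvReadPrev, pvRowAppend_pyr, pvPairAt]
      split_ifs with h <;> simp
    rw [hstep, ih]
    simp [List.append_assoc]

lemma pvPrevLen (k : Nat) :
    ((PySem.List.pyGet? (pvPyr k ++ [[]]) (-2)).getD ([] : List Int)) = pvRow k := by
  rw [PySem.List.pyGet?_neg_ofNat (pvPyr k ++ [[]]) 2 (by norm_num) (by simp [pvPyr_length])]
  rw [show (pvPyr k ++ [([] : List Int)]).length - 2 = k by simp [pvPyr_length],
      List.getElem?_append_left (by simp [pvPyr_length]), pvPyr_get]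
  rfl

lemma pvLoopA (k : Nat) :
    (PySem.List.pyRange 1 (1 + (k : Int)) 1).foldl (fun pyramid n =>
      let pyramid := pyramid ++ [[]]
      let prevLen : Int := ((PySem.List.pyGet? pyramid (-2)).getD []).length
      let pyramid := (PySem.List.pyRange 0 (prevLen - 1) 1).foldl (fun pyramid i =>
        let a := (PySem.List.pyGet? ((PySem.List.pyGet? pyramid (n - 1)).getD []) i).getD 0
        let b := (PySem.List.pyGet? ((PySem.List.pyGet? pyramid (n - 1)).getD []) (i + 1)).getD 0
        let pyramid := pvRowAppend pyramid n a
        if a + b = n + 1 then pvRowAppend pyramid n (n + 1) else pyramid) pyramid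
      pvRowAppend pyramid n
        ((PySem.List.pyGet? ((PySem.List.pyGet? pyramid (n - 1)).getD []) (-1)).getD 0))
      [[1, 1]]
    = pvPyr k := by
  induction k with
  | zero =>
    rw [show (1 + ((0 : Nat) : Int)) = 1 by norm_num, PySem.List.pyRange_one_eq_nil le_rfl]
    simp [pvPyr, pvRow]
  | succ k ih =>
    have hsplit : PySem.List.pyRange 1 (1 + ((k + 1 : Nat) : Int)) 1
        = PySem.List.pyRange 1 (1 + (k : Int)) 1 ++ [1 + (k : Int)] := by
      push_cast
      rw [show (1 : Int) + ((k : Int) + 1) = (1 + (k : Int)) + 1 by ring]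
      exact PySem.List.pyRange_one_succ_right (by omega)
    rw [hsplit, List.foldl_append, ih]
    simp only [show (1 : Int) + (k : Int) = (k : Int) + 1 from by ring, List.foldl_cons,
      List.foldl_nil]
    rw [show (pvPyr k ++ [([] : List Int)]) = pvPyr k ++ [[]] from rfl]
    simp only [pvPrevLen]
    rw [pvInnerA k _ []]
    simp only [pvReadPrev, List.nil_append]
    rw [pvRowAppend_pyr]
    rw [pvFlatPairs ((k : Int) + 2) (pvRow k) (pvRow_ne_nil k)]
    rw [show pvNext ((k : Int) + 2) (pvRow k) = pvRow (k + 1) from rfl, pvPyr_succ]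

-- ---------- B side: the Farey fraction rows ----------
-- the insertion construction carried out on (numerator, denominator) pairs
def fbet (t : Int) : Int × Int → List (Int × Int) → List (Int × Int)
  | _, [] => []
  | p, q :: r => (if p.2 + q.2 = t then [(p.1 + q.1, p.2 + q.2)] else []) ++ q :: fbet t q r

def fnext (t : Int) : List (Int × Int) → List (Int × Int)
  | [] => []
  | q :: r => q :: fbet t q r

def frow : Nat → List (Int × Int)
  | 0 => [(0, 1), (1, 1)]
  | k + 1 => fnext ((k : Int) + 2) (frow k)

lemma map_fbet (t : Int) : ∀ (l : List (Int × Int)) (p : Int × Int),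
    (fbet t p l).map Prod.snd = pvBetween t p.2 (l.map Prod.snd) := by
  intro l
  induction l with
  | nil => intro p; simp [fbet, pvBetween]
  | cons q r ih =>
    intro p
    simp only [fbet, pvBetween, List.map_append, List.map_cons]
    split_ifs with h <;> simp [ih, h]

lemma map_frow (k : Nat) : (frow k).map Prod.snd = pvRow k := by
  induction k with
  | zero => simp [frow, pvRow]
  | succ k ih =>
    rw [show frow (k + 1) = fnext ((k : Int) + 2) (frow k) from rfl,
        show pvRow (k + 1) = pvNext ((k : Int) + 2) (pvRow k) from rfl, ← ih]
    cases frow k with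
    | nil => simp [fnext, pvNext]
    | cons q r => simp [fnext, pvNext, map_fbet]

-- the Farey neighbour invariant
def adjOK (n : Int) (p q : Int × Int) : Prop := q.1 * p.2 - p.1 * q.2 = 1 ∧ n < p.2 + q.2
def elOK (n : Int) (p : Int × Int) : Prop := 0 ≤ p.1 ∧ p.1 ≤ p.2 ∧ 1 ≤ p.2 ∧ p.2 ≤ n

lemma fbet_chain (n : Int) : ∀ (l : List (Int × Int)) (p : Int × Int),
    List.IsChain (adjOK n) (p :: l) → elOK n p → (∀ q ∈ l, elOK n q) →
    List.IsChain (adjOK (n + 1)) (p :: fbet (n + 1) p l) ∧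
      (∀ q ∈ fbet (n + 1) p l, elOK (n + 1) q) := by
  intro l
  induction l with
  | nil => intro p _ _ _; exact ⟨by simp [fbet], by simp [fbet]⟩
  | cons q r ih =>
    intro p hch hp hall
    rw [List.isChain_cons_cons] at hch
    obtain ⟨hpq, hch⟩ := hch
    have hq := hall q (by simp)
    have ihq := ih q hch hq (fun x hx => hall x (by simp [hx]))
    obtain ⟨h1, h2⟩ := hpq
    obtain ⟨hp1, hp2, hp3, hp4⟩ := hp
    obtain ⟨hq1, hq2, hq3, hq4⟩ := hq
    simp only [fbet]
    split_ifs with h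
    · refine ⟨?_, ?_⟩
      · simp only [List.cons_append, List.nil_append]
        rw [List.isChain_cons_cons, List.isChain_cons_cons]
        exact ⟨⟨by dsimp; linear_combination h1, by dsimp; omega⟩,
               ⟨by dsimp; linear_combination h1, by dsimp; omega⟩, ihq.1⟩
      · intro x hx
        simp only [List.cons_append, List.nil_append, List.mem_cons] at hx
        rcases hx with rfl | rfl | hx
        · exact ⟨by dsimp; omega, by dsimp; omega, by dsimp; omega, by dsimp; omega⟩
        · exact ⟨hq1, hq2, hq3, by omega⟩
        · exact ihq.2 x hx
    · refine ⟨?_, ?_⟩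
      · simp only [List.nil_append]
        rw [List.isChain_cons_cons]
        exact ⟨⟨h1, by omega⟩, ihq.1⟩
      · intro x hx
        simp only [List.nil_append, List.mem_cons] at hx
        rcases hx with rfl | hx
        · exact ⟨hq1, hq2, hq3, by omega⟩
        · exact ihq.2 x hx

lemma fbet_ne_nil (t : Int) (p q : Int × Int) (r : List (Int × Int)) :
    fbet t p (q :: r) ≠ [] := by
  simp only [fbet]
  split_ifs <;> simp

lemma fbet_last (t : Int) : ∀ (l : List (Int × Int)) (p : Int × Int), l ≠ [] →
    (fbet t p l).getLast? = l.getLast? := by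
  intro l
  induction l with
  | nil => intro p h; exact absurd rfl h
  | cons q r ih =>
    intro p _
    simp only [fbet]
    cases r with
    | nil =>
      split_ifs <;> simp [fbet]
    | cons x r' =>
      rw [List.getLast?_append_of_ne_nil _ (by simp),
          show q :: fbet t q (x :: r') = [q] ++ fbet t q (x :: r') from rfl,
          List.getLast?_append_of_ne_nil _ (fbet_ne_nil t q x r'),
          ih q (by simp), List.getLast?_cons_cons]

lemma frow_inv (k : Nat) : ∃ tl, frow k = (0, 1) :: (1, (k : Int) + 1) :: tl ∧
    List.IsChain (adjOK ((k : Int) + 1)) (frow k) ∧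
    (∀ p ∈ frow k, elOK ((k : Int) + 1) p) ∧
    (frow k).getLast? = some (1, 1) := by
  induction k with
  | zero =>
    refine ⟨[], by norm_num [frow], ?_, ?_, by simp [frow]⟩
    · rw [show frow 0 = [(0, 1), (1, 1)] from rfl, List.isChain_cons_cons]
      exact ⟨⟨by norm_num, by norm_num⟩, List.isChain_singleton _⟩
    · intro p hp
      rw [show frow 0 = [(0, 1), (1, 1)] from rfl] at hp
      simp only [List.mem_cons, List.not_mem_nil, or_false] at hp
      rcases hp with rfl | rfl <;> exact ⟨by norm_num, by norm_num, by norm_num, by norm_num⟩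
  | succ k ih =>
    obtain ⟨tl, heq, hch, hel, hlast⟩ := ih
    rw [show ((k + 1 : Nat) : Int) + 1 = ((k : Int) + 1) + 1 by push_cast; ring]
    have hfr : frow (k + 1) = fnext (((k : Int) + 1) + 1) (frow k) := by
      rw [show (((k : Int) + 1) + 1) = (k : Int) + 2 by ring]; rfl
    have hchain : List.IsChain (adjOK ((k : Int) + 1)) ((0, 1) :: (1, (k : Int) + 1) :: tl) := by
      rw [← heq]; exact hch
    have hel' : ∀ q ∈ (1, (k : Int) + 1) :: tl, elOK ((k : Int) + 1) q := by
      intro q hq; exact hel q (by rw [heq]; simp [hq])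
    have h01 : elOK ((k : Int) + 1) ((0 : Int), (1 : Int)) :=
      ⟨by norm_num, by norm_num, by norm_num, by omega⟩
    have hbc := fbet_chain ((k : Int) + 1) ((1, (k : Int) + 1) :: tl) (0, 1) hchain h01 hel'
    have hexp : fbet (((k : Int) + 1) + 1) (0, 1) ((1, (k : Int) + 1) :: tl)
        = (1, ((k : Int) + 1) + 1) :: (1, (k : Int) + 1)
            :: fbet (((k : Int) + 1) + 1) (1, (k : Int) + 1) tl := by
      simp only [fbet]
      rw [if_pos (show ((0 : Int), (1 : Int)).2 + ((1 : Int), (k : Int) + 1).2 = ((k : Int) + 1) + 1 by dsimp; ring)]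
      simp only [List.cons_append, List.nil_append, List.cons.injEq, Prod.mk.injEq]
      refine ⟨⟨by norm_num, by ring⟩, trivial⟩
    refine ⟨(1, (k : Int) + 1) :: fbet (((k : Int) + 1) + 1) (1, (k : Int) + 1) tl, ?_, ?_, ?_, ?_⟩
    · rw [hfr, heq]
      simp only [fnext]
      rw [hexp]
    · rw [hfr, heq]
      simp only [fnext]
      exact (fbet_chain ((k : Int) + 1) ((1, (k : Int) + 1) :: tl) (0, 1) hchain h01 hel').1
    · intro p hp
      rw [hfr, heq] at hp
      simp only [fnext, List.mem_cons] at hp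
      rcases hp with rfl | hp
      · exact ⟨by norm_num, by norm_num, by norm_num, by omega⟩
      · exact hbc.2 p hp
    · rw [hfr, heq]
      simp only [fnext]
      rw [show ((0, 1) : Int × Int) :: fbet (((k : Int) + 1) + 1) (0, 1) ((1, (k : Int) + 1) :: tl)
            = [((0, 1) : Int × Int)] ++ fbet (((k : Int) + 1) + 1) (0, 1) ((1, (k : Int) + 1) :: tl) from rfl,
          List.getLast?_append_of_ne_nil _ (fbet_ne_nil _ _ _ _),
          fbet_last _ _ _ (by simp)]
      rw [heq, List.getLast?_cons_cons] at hlast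
      exact hlast

-- strict value increase gives distinctness, hence a length bound
def vlt (p q : Int × Int) : Prop := p.1 * q.2 < q.1 * p.2

lemma vlt_trans_mid (p q r : Int × Int) (hp : 1 ≤ p.2) (hq : 1 ≤ q.2) (hr : 1 ≤ r.2)
    (h1 : vlt p q) (h2 : vlt q r) : vlt p r := by
  unfold vlt at *
  nlinarith [mul_lt_mul_of_pos_right h1 (show (0:Int) < r.2 by omega),
             mul_lt_mul_of_pos_right h2 (show (0:Int) < p.2 by omega)]

lemma chain_lower (n : Int) : ∀ (l : List (Int × Int)) (p : Int × Int),
    List.IsChain (adjOK n) (p :: l) → (∀ q ∈ p :: l, 1 ≤ q.2) → ∀ q ∈ l, vlt p q := by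
  intro l
  induction l with
  | nil => intro p _ _ q hq; simp at hq
  | cons q r ih =>
    intro p hch hden x hx
    rw [List.isChain_cons_cons] at hch
    have hvpq : vlt p q := by
      have := hch.1.1; unfold vlt; linarith
    rcases List.mem_cons.mp hx with rfl | hx
    · exact hvpq
    · have hvqx : vlt q x :=
        ih q hch.2 (fun y hy => hden y (by simp at hy ⊢; tauto)) x hx
      exact vlt_trans_mid p q x (hden p (by simp)) (hden q (by simp))
        (hden x (by simp [hx])) hvpq hvqx

lemma chain_pairwise (n : Int) : ∀ (l : List (Int × Int)),
    List.IsChain (adjOK n) l → (∀ q ∈ l, 1 ≤ q.2) → List.Pairwise vlt l := by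
  intro l
  induction l with
  | nil => intro _ _; simp
  | cons p l ih =>
    intro hch hden
    rw [List.pairwise_cons]
    exact ⟨chain_lower n l p hch hden,
           ih hch.tail (fun q hq => hden q (by simp [hq]))⟩

lemma length_le_box (n : Int) (_hn : 0 ≤ n) (l : List (Int × Int))
    (hnd : l.Nodup) (hmem : ∀ p ∈ l, elOK n p) :
    l.length ≤ (n + 1).toNat * n.toNat := by
  have hsub : l.toFinset ⊆ Finset.Icc (0 : Int) n ×ˢ Finset.Icc (1 : Int) n := by
    intro p hp
    rw [List.mem_toFinset] at hp
    obtain ⟨h1, h2, h3, h4⟩ := hmem p hp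
    rw [Finset.mem_product, Finset.mem_Icc, Finset.mem_Icc]
    omega
  have hcard := Finset.card_le_card hsub
  rw [List.toFinset_card_of_nodup hnd, Finset.card_product, Int.card_Icc, Int.card_Icc] at hcard
  calc l.length ≤ (n + 1 - 0).toNat * (n + 1 - 1).toNat := hcard
    _ = (n + 1).toNat * n.toNat := by norm_num

-- the key step: two consecutive Farey neighbours determine the next via k = (n + b) // d
lemma farey_step (n a b c d e f : Int) (h1 : c * b - a * d = 1) (h2 : e * d - c * f = 1)
    (hd : 1 ≤ d) (hfn : f ≤ n) (hdf : n < d + f) (_hb : 0 ≤ b) :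
    PySem.Int.floordiv (n + b) d * c - a = e ∧ PySem.Int.floordiv (n + b) d * d - b = f := by
  have hco : IsCoprime d c := ⟨-a, b, by linear_combination h1⟩
  have hmul : d ∣ (f + b) * c := ⟨e + a, by linear_combination h1 - h2⟩
  have hdvd : d ∣ f + b := hco.dvd_of_dvd_mul_right hmul
  obtain ⟨q, hq⟩ := hdvd
  have h3 : q * d = f + b := by linear_combination -hq
  have hkq : PySem.Int.floordiv (n + b) d = q := by
    rw [PySem.Int.floordiv_eq_iff_of_pos (by omega)]
    constructor
    · rw [h3]; omega
    · have h4 : (q + 1) * d = q * d + d := by ring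
      rw [h4, h3]; omega
  have he : e + a = c * q := by
    have hcan : d * (e + a) = d * (c * q) := by linear_combination h2 - h1 + c * hq
    exact mul_left_cancel₀ (by omega : (d : Int) ≠ 0) hcan
  rw [hkq]
  constructor
  · linear_combination -he
  · linear_combination -hq

-- the while loop walks the fraction row
lemma loop_run (n : Int) (hn : 1 ≤ n) :
    ∀ (l : List (Int × Int)) (a b c d : Int) (out : List Int) (fuel : Nat),
    List.IsChain (adjOK n) ((a, b) :: (c, d) :: l) →
    (∀ p ∈ (a, b) :: (c, d) :: l, elOK n p) →
    ((c, d) :: l).getLast? = some (1, 1) →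
    l.length + 2 ≤ fuel →
    fareyLoop n fuel a b c d out = out ++ ((c, d) :: l).map Prod.snd := by
  intro l
  induction l with
  | nil =>
    intro a b c d out fuel hch hel hlast hfuel
    have hcd : c = 1 ∧ d = 1 := by
      simp [Prod.ext_iff] at hlast
      exact hlast
    obtain ⟨rfl, rfl⟩ := hcd
    have hab : adjOK n (a, b) (1, 1) := by
      rw [List.isChain_cons_cons] at hch; exact hch.1
    have hb : b = a + 1 := by have := hab.1; dsimp at this; omega
    obtain ⟨f2, rfl⟩ : ∃ f2, fuel = (f2 + 1) + 1 := ⟨fuel - 2, by omega⟩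
    simp only [fareyLoop, if_pos hn]
    have hk : PySem.Int.floordiv (n + b) 1 = n + b := by
      rw [PySem.Int.floordiv_eq_ediv_of_pos (by norm_num)]; simp
    rw [hk]
    rw [if_neg (by omega : ¬ (n + b) * 1 - a ≤ n)]
    simp
  | cons ef l' ih =>
    intro a b c d out fuel hch hel hlast hfuel
    obtain ⟨e, f⟩ := ef
    rw [List.isChain_cons_cons] at hch
    obtain ⟨hch1, hchtail⟩ := hch
    have hch2 : adjOK n (c, d) (e, f) := by
      rw [List.isChain_cons_cons] at hchtail; exact hchtail.1
    have helab := hel (a, b) (by simp)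
    have helcd := hel (c, d) (by simp)
    have helef := hel (e, f) (by simp)
    obtain ⟨f1, rfl⟩ : ∃ f1, fuel = f1 + 1 := ⟨fuel - 1, by omega⟩
    simp only [fareyLoop]
    rw [if_pos (by obtain ⟨_, hc2, _, hc4⟩ := helcd; dsimp at hc2 hc4; omega)]
    have hstep := farey_step n a b c d e f
      (by have := hch1.1; dsimp at this; linarith)
      (by have := hch2.1; dsimp at this; linarith)
      (by obtain ⟨_, _, h, _⟩ := helcd; exact h)
      (by obtain ⟨_, _, _, h⟩ := helef; exact h)
      (by have := hch2.2; dsimp at this; omega)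
      (by obtain ⟨h, h2, _, _⟩ := helab; dsimp at h h2; omega)
    rw [hstep.1, hstep.2]
    rw [ih c d e f (out ++ [d]) f1
      hchtail
      (fun p hp => hel p (by simp at hp ⊢; tauto))
      (by rw [← hlast, List.getLast?_cons_cons])
      (by simpa using hfuel)]
    simp

-- each Farey-generated row equals the insertion row
lemma fareyRow_eq (k : Nat) : fareyRow ((k : Int) + 1) = pvRow k := by
  obtain ⟨tl, heq, hch, hel, hlast⟩ := frow_inv k
  have hn : (1 : Int) ≤ (k : Int) + 1 := by omega
  have hden : ∀ q ∈ frow k, 1 ≤ q.2 := fun q hq => (hel q hq).2.2.1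
  have hnodup : (frow k).Nodup := by
    have hp := chain_pairwise ((k : Int) + 1) (frow k) hch hden
    exact hp.imp (fun h => by
      intro hpq; rw [hpq] at h; exact lt_irrefl _ h)
  have hlen : (frow k).length ≤ ((k : Int) + 1 + 1).toNat * ((k : Int) + 1).toNat :=
    length_le_box ((k : Int) + 1) (by omega) (frow k) hnodup hel
  have hfuel : tl.length + 2 ≤ ((((k : Int) + 1).toNat + 1) * (((k : Int) + 1).toNat + 1) + 2) := by
    have h1 : tl.length + 2 = (frow k).length := by rw [heq]; simp
    have h2 : ((k : Int) + 1 + 1).toNat = ((k : Int) + 1).toNat + 1 := by omega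
    rw [h1]
    calc (frow k).length ≤ ((k : Int) + 1 + 1).toNat * ((k : Int) + 1).toNat := hlen
      _ ≤ (((k : Int) + 1).toNat + 1) * (((k : Int) + 1).toNat + 1) := by
          rw [h2]; exact Nat.mul_le_mul_left _ (by omega)
      _ ≤ (((k : Int) + 1).toNat + 1) * (((k : Int) + 1).toNat + 1) + 2 := by omega
  have hchain : List.IsChain (adjOK ((k : Int) + 1)) ((0, 1) :: (1, (k : Int) + 1) :: tl) := by
    rw [← heq]; exact hch
  have hel' : ∀ p ∈ ((0 : Int), (1 : Int)) :: ((1 : Int), (k : Int) + 1) :: tl, elOK ((k : Int) + 1) p := by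
    rw [← heq]; exact hel
  have hlast' : (((1 : Int), (k : Int) + 1) :: tl).getLast? = some (1, 1) := by
    rw [← List.getLast?_cons_cons (a := ((0 : Int), (1 : Int))), ← heq]; exact hlast
  unfold fareyRow
  rw [loop_run ((k : Int) + 1) hn tl 0 1 1 ((k : Int) + 1) [1] _ hchain hel' hlast' hfuel]
  rw [← map_frow k, heq]
  simp

-- B's outer fold equals the pyramid of insertion rows
lemma pvLoopB (K : Nat) :
    (PySem.List.pyRange 2 (2 + (K : Int)) 1).foldl
      (fun pyramid order => pyramid ++ [fareyRow order]) [[1, 1]]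
    = pvPyr K := by
  induction K with
  | zero =>
    rw [show (2 + ((0 : Nat) : Int)) = 2 by norm_num, PySem.List.pyRange_one_eq_nil (by norm_num)]
    simp [pvPyr, pvRow]
  | succ K ih =>
    have hsplit : PySem.List.pyRange 2 (2 + ((K + 1 : Nat) : Int)) 1
        = PySem.List.pyRange 2 (2 + (K : Int)) 1 ++ [2 + (K : Int)] := by
      push_cast
      rw [show (2 : Int) + ((K : Int) + 1) = (2 + (K : Int)) + 1 by ring]
      exact PySem.List.pyRange_one_succ_right (by omega)
    rw [hsplit, List.foldl_append, ih]
    simp only [List.foldl_cons, List.foldl_nil]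
    rw [show (2 + (K : Int)) = (((K + 1 : Nat) : Int) + 1) by push_cast; ring,
        fareyRow_eq (K + 1), pvPyr_succ]

lemma pvA (k : Nat) : create_pyramid (1 + (k : Int)) = pvPyr k := by
  show (PySem.List.pyRange 1 (1 + (k : Int)) 1).foldl _ ([] ++ [[1, 1]]) = pvPyr k
  exact pvLoopA k

lemma pvB (k : Nat) : create_pyramid_alt (1 + (k : Int)) = pvPyr k := by
  show (PySem.List.pyRange 2 ((1 + (k : Int)) + 1) 1).foldl _ [[1, 1]] = pvPyr k
  rw [show (1 + (k : Int)) + 1 = 2 + (k : Int) by ring, pvLoopB]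

lemma pvNeg (lines : Int) (h : lines < 1) : create_pyramid lines = create_pyramid_alt lines := by
  unfold create_pyramid create_pyramid_alt
  rw [PySem.List.pyRange_one_eq_nil (by omega : lines ≤ 1),
      PySem.List.pyRange_one_eq_nil (by omega : lines + 1 ≤ 2)]
  rfl

-- ===== VERDICT (by name: the statement is the Claim_ definition above) =====
theorem create_pyramid_spec : Claim_equal_create_pyramid := by
  intro lines _
  unfold Spec_create_pyramid
  by_cases h : 1 ≤ lines
  · have hk : lines = 1 + ((lines - 1).toNat : Int) := by omega
    rw [hk, pvA, pvB]
  · exact pvNeg lines (by omega)
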